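-- pv_equiv track=rewrite | github.com/bfinke/Advent-of-Code-2023 | Day 1/part_two.py | end_num
-- ===== SOURCE A (Python) =====
-- def end_num(string):
--     chars = []
--     for char in range(len(string) - 1, -1, -1):
--         try:
--             value = int(string[char])
--             return str(value)
--         except ValueError:
--             chars.insert(0, string[char])
--         for k, v in num_dict.items():
--             new_string = "".join(chars)
--             if k in new_string:
--                 return v
--             else:
--                 continue
--
-- num_dict = {'one': '1', 'two': '2', 'three': '3', 'four': '4', 'five': '5',
--             'six': '6', 'seven': '7', 'eight': '8', 'nine': '9'}
-- ===== SOURCE B (Python) =====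
-- # Forward single pass keeping the last match found (digit or number word starting
-- # at the index); no suffix rebuilding/rescanning (O(n) vs A's O(n^2)).
-- num_dict = {'one': '1', 'two': '2', 'three': '3', 'four': '4', 'five': '5',
--             'six': '6', 'seven': '7', 'eight': '8', 'nine': '9'}
--
-- def end_num(string):
--     last = None
--     for i in range(len(string)):
--         c = string[i]
--         if '0' <= c <= '9':
--             last = c
--         else:
--             for k, v in num_dict.items():
--                 if string[i:i + len(k)] == k:
--                     last = v
--                     break
--     return last
-- ===== Notes on version B (the rewrite author's own statement) =====
-- stated objective: faster
-- what changed: Instead of a backward scan that rebuilds the suffix string and rescans it for every dict word at every step, B makes one forward pass keeping the last match found (a digit, or a number word starting exactly at the current index, checked by a fixed-length slice comparison).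
import Mathlib
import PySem

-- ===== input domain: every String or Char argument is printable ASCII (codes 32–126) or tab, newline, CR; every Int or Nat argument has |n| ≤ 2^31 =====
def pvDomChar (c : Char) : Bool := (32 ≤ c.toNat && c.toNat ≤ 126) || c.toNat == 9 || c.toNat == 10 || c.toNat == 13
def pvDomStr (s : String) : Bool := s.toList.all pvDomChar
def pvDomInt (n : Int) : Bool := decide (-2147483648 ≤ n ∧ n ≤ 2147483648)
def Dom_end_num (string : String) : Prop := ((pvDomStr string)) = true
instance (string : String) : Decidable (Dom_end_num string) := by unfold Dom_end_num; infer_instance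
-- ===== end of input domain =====

-- B replaces A's quadratic backward suffix-rebuild-and-rescan with one forward pass that
-- keeps the last digit or number word found via a fixed-length slice test (objective: faster).


-- ===== PORT A =====
-- num_dict = {'one': '1', …} (distinct literal keys; .items() iterates this list in insertion order)
def numDictA : List (String × String) :=
  [("one", "1"), ("two", "2"), ("three", "3"), ("four", "4"), ("five", "5"),
   ("six", "6"), ("seven", "7"), ("eight", "8"), ("nine", "9")]

-- 'for k, v in num_dict.items(): new_string = "".join(chars); if k in new_string: return v else: continue'
-- (chars is a list of 1-char strings; "".join(chars) is the List Char `chars` as a string, `in` = PySem.Chars.isIn)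
def endNumCheckA (chars : List Char) : List (String × String) → Option String
  | [] => none
  | (k, v) :: rest =>
      if PySem.Chars.isIn k.toList chars then some v else endNumCheckA chars rest

-- 'for char in range(len(string)-1, -1, -1)': fuel = i+1 means current index i; callers keep i < length,
-- so string[char] is s.getD i ' ' (always in range).  try int(string[char]) → PySem.Int.ofChars? [c];
-- return str(value) → PySem.Int.toStr; except: chars.insert(0, string[char]) → c :: chars.
def endNumLoopA (s : List Char) : Nat → List Char → Option String
  | 0, _ => none
  | i + 1, chars =>
      let c := s.getD i ' '
      match PySem.Int.ofChars? [c] with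
      | some value => some (PySem.Int.toStr value)
      | none =>
          let chars' := c :: chars
          match endNumCheckA chars' numDictA with
          | some v => some v
          | none => endNumLoopA s i chars'

def end_num (string : String) : Option String :=
  endNumLoopA string.toList string.toList.length []

-- ===== PORT B =====
def numDictB : List (String × String) :=
  [("one", "1"), ("two", "2"), ("three", "3"), ("four", "4"), ("five", "5"),
   ("six", "6"), ("seven", "7"), ("eight", "8"), ("nine", "9")]

-- 'for k, v in num_dict.items(): if string[i:i+len(k)] == k: last = v; break'
def endNumMatchB (s : List Char) (i : Nat) : List (String × String) → Option String
  | [] => none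
  | (k, v) :: rest =>
      if PySem.List.slice s (some (i : Int)) (some ((i : Int) + (k.toList.length : Int))) = k.toList
      then some v else endNumMatchB s i rest

-- 'last = None; for i in range(len(string)): …; return last' — forward foldl with the
-- accumulator `last`; string[i] with 0 ≤ i < len is s.getD i ' ' (always in range).
def end_num_alt (string : String) : Option String :=
  (List.range string.toList.length).foldl (fun last i =>
    let c := string.toList.getD i ' '
    if '0' ≤ c ∧ c ≤ '9' then some (String.ofList [c])
    else
      match endNumMatchB string.toList i numDictB with
      | some v => some v
      | none => last) none

-- ===== PRECONDITION & SPEC =====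
def Spec_end_num (string : String) (out : Option String) : Prop := out = end_num_alt string
instance (string : String) (out : Option String) : Decidable (Spec_end_num string out) := by unfold Spec_end_num; infer_instance

-- ===== CLAIM (what is proved, stated in full; the proofs are below) =====
def Claim_equal_end_num : Prop := ∀ (string : String), Dom_end_num string → Spec_end_num string (end_num string)

-- ===== LEMMAS AND PROOFS =====

-- Proof-side bridge: the same per-index test as B, but scanned backward with early return,
-- which is the shape of A's loop.
def endNumBack (s : List Char) : Nat → Option String
  | 0 => none
  | i + 1 =>
      let c := s.getD i ' '
      if '0' ≤ c ∧ c ≤ '9' then some (String.ofList [c])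
      else
        match endNumMatchB s i numDictB with
        | some v => some v
        | none => endNumBack s i

-- B's forward fold keeping the last match equals the backward early-return scan.
theorem fwd_eq_back (s : List Char) : ∀ n,
    (List.range n).foldl (fun last i =>
      let c := s.getD i ' '
      if '0' ≤ c ∧ c ≤ '9' then some (String.ofList [c])
      else
        match endNumMatchB s i numDictB with
        | some v => some v
        | none => last) none = endNumBack s n := by
  intro n
  induction n with
  | zero => rfl
  | succ n ih =>
      rw [List.range_succ, List.foldl_append, ih]
      rfl

-- For a printable-ASCII (or tab/newline/CR) char, int() on the 1-char string succeeds exactly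
-- on '0'..'9' and then str(int(c)) is the char back.
set_option maxHeartbeats 1000000 in
theorem digit_branch (c : Char) (h : pvDomChar c = true) :
    (PySem.Int.ofChars? [c]).map PySem.Int.toStr
      = if '0' ≤ c ∧ c ≤ '9' then some (String.ofList [c]) else none := by
  have hb : (32 ≤ c.toNat ∧ c.toNat ≤ 126) ∨ c.toNat = 9 ∨ c.toNat = 10 ∨ c.toNat = 13 := by
    simp only [pvDomChar, Bool.or_eq_true, Bool.and_eq_true, decide_eq_true_eq, beq_iff_eq] at h
    tauto
  have hc : c = Char.ofNat c.toNat := (Char.ofNat_toNat c).symm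
  have h1 : 9 ≤ c.toNat := by omega
  have h2 : c.toNat ≤ 126 := by omega
  set n := c.toNat with hn
  clear_value n
  interval_cases n <;> (rw [hc]; decide)

-- If no word is contained in the old suffix t, a word is contained in the new suffix
-- c :: t = s.drop i exactly when it is a prefix there, i.e. when B's slice test fires.
theorem check_eq_match (s : List Char) (i : Nat) (c : Char) (t : List Char)
    (hdrop : s.drop i = c :: t) :
    ∀ d : List (String × String), endNumCheckA t d = none →
      endNumCheckA (c :: t) d = endNumMatchB s i d := by
  intro d
  induction d with
  | nil => intro _; rfl
  | cons p rest ih =>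
      intro h
      obtain ⟨k, v⟩ := p
      rw [endNumCheckA] at h
      by_cases hin : PySem.Chars.isIn k.toList t = true
      · simp [hin] at h
      · rw [endNumCheckA, endNumMatchB]
        have hslice : PySem.List.slice s (some (i : Int)) (some ((i : Int) + (k.toList.length : Int)))
            = (s.drop i).take k.toList.length := PySem.List.slice_natCast_add s i k.toList.length
        have hsub : (PySem.Chars.isIn k.toList (c :: t) = true)
            ↔ (PySem.List.slice s (some (i : Int)) (some ((i : Int) + (k.toList.length : Int))) = k.toList) := by
          rw [hslice, hdrop]
          constructor
          · intro hi
            have := (PySem.Chars.isIn_iff_infix _ _).mp hi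
            rcases List.infix_cons_iff.mp this with hp | h2
            · exact ((List.prefix_iff_eq_take.mp hp).symm)
            · exact absurd ((PySem.Chars.isIn_iff_infix _ _).mpr h2) hin
          · intro he
            exact (PySem.Chars.isIn_iff_infix _ _).mpr
              (List.infix_cons_iff.mpr (Or.inl (List.prefix_iff_eq_take.mpr he.symm)))
        by_cases hk : PySem.List.slice s (some (i : Int)) (some ((i : Int) + (k.toList.length : Int))) = k.toList
        · rw [if_pos hk, if_pos (hsub.mpr hk)]
        · rw [if_neg hk, if_neg (fun hi => hk (hsub.mp hi))]
          exact ih (by simpa [hin] using h)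

-- Main loop invariant: entering step i of A with chars = s.drop i and no word contained yet,
-- A's backward loop equals the backward early-return scan over B's per-index test.
theorem loops_eq (s : List Char) (hdom : s.all pvDomChar = true) :
    ∀ i, i ≤ s.length → endNumCheckA (s.drop i) numDictA = none →
      endNumLoopA s i (s.drop i) = endNumBack s i := by
  intro i
  induction i with
  | zero => intro _ _; rfl
  | succ i ih =>
      intro hle hinv
      have hi : i < s.length := by omega
      have hdrop : s.drop i = s[i] :: s.drop (i + 1) := List.drop_eq_getElem_cons hi
      have hgetD : s.getD i ' ' = s[i] := List.getD_eq_getElem s ' ' hi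
      have hchar : pvDomChar s[i] = true := by
        rw [List.all_eq_true] at hdom
        exact hdom _ (s.getElem_mem hi)
      have hdig := digit_branch s[i] hchar
      rw [endNumLoopA, endNumBack, hgetD]
      by_cases hd : '0' ≤ s[i] ∧ s[i] ≤ '9'
      · rw [if_pos hd] at hdig ⊢
        cases ho : PySem.Int.ofChars? [s[i]] with
        | none => rw [ho] at hdig; simp at hdig
        | some v =>
            rw [ho] at hdig
            simpa using hdig
      · rw [if_neg hd] at hdig ⊢
        cases ho : PySem.Int.ofChars? [s[i]] with
        | some v => rw [ho] at hdig; simp at hdig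
        | none =>
            have hcc : s[i] :: s.drop (i + 1) = s.drop i := hdrop.symm
            have hch := check_eq_match s i s[i] (s.drop (i + 1)) hdrop numDictA hinv
            rw [show (s[i] :: s.drop (i + 1)) = s.drop i from hcc] at hch
            rw [show (s[i] :: s.drop (i + 1)) = s.drop i from hcc]
            show (match endNumCheckA (s.drop i) numDictA with
                  | some v => some v
                  | none => endNumLoopA s i (s.drop i)) =
                 (match endNumMatchB s i numDictB with
                  | some v => some v
                  | none => endNumBack s i)
            rw [hch, show numDictB = numDictA from rfl]
            cases hst : endNumMatchB s i numDictA with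
            | some v => rfl
            | none =>
                show endNumLoopA s i (s.drop i) = endNumBack s i
                exact ih (by omega) (by rw [hch, hst])

-- ===== VERDICT (by name: the statement is the Claim_ definition above) =====
theorem end_num_spec : Claim_equal_end_num := by
  intro string hdom
  unfold Spec_end_num end_num end_num_alt
  have h0 : endNumCheckA (string.toList.drop string.toList.length) numDictA = none := by
    rw [List.drop_length]; decide
  have hA := loops_eq string.toList hdom string.toList.length le_rfl h0
  rw [List.drop_length] at hA
  rw [hA, fwd_eq_back]
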